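-- pv_equiv track=rewrite | github.com/ultilix/catawampus | dm/brcmwifi.py | ValidateSSID
-- ===== SOURCE A (Python) =====
-- def ValidateSSID(value):
--   invalid = set(['?', '"', '$', '\\', '[', ']', '+'])
--   for i in invalid:
--     if i in value:
--       return False
--   if value[0] == '!' or value[0] == '#' or value[0] == ';':
--     return False
--   return True
-- ===== SOURCE B (Python) =====
-- def ValidateSSID(value):
--   invalid = set('?"$\\[]+')
--   if any(c in invalid for c in value):
--     return False
--   return value[0] not in '!#;'
-- ===== Notes on version B (the rewrite author's own statement) =====
-- stated objective: idiomatic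
-- what changed: Replace A's loop over the 7 forbidden characters (each doing a full substring scan of value) by a single pass over value testing set membership, and fold the three-way prefix comparison into a single membership test.
import Mathlib
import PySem

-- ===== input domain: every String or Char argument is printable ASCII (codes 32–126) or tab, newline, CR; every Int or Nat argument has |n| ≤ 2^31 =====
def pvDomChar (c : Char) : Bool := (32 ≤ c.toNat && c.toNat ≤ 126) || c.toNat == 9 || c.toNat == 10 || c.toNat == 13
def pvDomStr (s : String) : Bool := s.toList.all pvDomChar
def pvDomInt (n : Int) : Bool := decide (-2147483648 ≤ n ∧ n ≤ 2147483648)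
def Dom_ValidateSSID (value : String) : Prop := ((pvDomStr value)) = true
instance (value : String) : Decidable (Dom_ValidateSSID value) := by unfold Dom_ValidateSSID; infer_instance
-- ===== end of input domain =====

-- B replaces A's per-forbidden-character substring scans by one pass over the input; return value only, both raise on "".

-- ===== PORT A =====
-- A's for-loop over the invalid set with early 'return False'; none = loop fell through
def pvLoopA (invalid : List Char) (v : List Char) : Option Bool :=
  match invalid with
  | [] => none
  | i :: rest => if v.contains i then some false else pvLoopA rest v

def ValidateSSID (value : String) : Bool :=
  let invalid : List Char := PySem.Set.ofList ['?', '"', '$', '\\', '[', ']', '+']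
  match pvLoopA invalid value.toList with
  | some b => b
  | none =>
    match PySem.List.pyGet? value.toList 0 with   -- value[0]; none = IndexError, excluded by Pre_
    | some c => if c = '!' ∨ c = '#' ∨ c = ';' then false else true
    | none => false

-- ===== PORT B =====
def ValidateSSID_alt (value : String) : Bool :=
  let invalid : List Char := PySem.Set.ofList ['?', '"', '$', '\\', '[', ']', '+']
  if value.toList.any (fun c => invalid.contains c) then false
  else
    match PySem.List.pyGet? value.toList 0 with   -- value[0]; none = IndexError, excluded by Pre_
    | some c => !(['!', '#', ';'].contains c)
    | none => false

-- ===== PRECONDITION & SPEC =====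
-- Pre_ excludes only the empty string, on which both A and B raise IndexError at value[0].
def Pre_ValidateSSID (value : String) : Prop := value ≠ ""
instance (value : String) : Decidable (Pre_ValidateSSID value) := by unfold Pre_ValidateSSID; infer_instance
def pvWitness_ValidateSSID : String := "myssid"

def Spec_ValidateSSID (value : String) (out : Bool) : Prop := out = ValidateSSID_alt value
instance (value : String) (out : Bool) : Decidable (Spec_ValidateSSID value out) := by unfold Spec_ValidateSSID; infer_instance

-- ===== CLAIM (what is proved, stated in full; the proofs are below) =====
def Claim_equal_ValidateSSID : Prop := ∀ (value : String), Dom_ValidateSSID value → Pre_ValidateSSID value → Spec_ValidateSSID value (ValidateSSID value)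

-- ===== LEMMAS AND PROOFS =====

-- A's loop returns 'some false' exactly when some forbidden character occurs in v
theorem pvLoopA_eq (invalid v : List Char) :
    pvLoopA invalid v = if invalid.any (fun i => v.contains i) then some false else none := by
  induction invalid with
  | nil => simp [pvLoopA]
  | cons i rest ih =>
      simp only [pvLoopA, List.any_cons, Bool.or_eq_true, ih]
      split_ifs <;> simp_all <;> tauto

-- scanning the forbidden set for occurrence in v = scanning v for membership in the set
theorem pvAny_swap (l v : List Char) :
    l.any (fun i => v.contains i) = v.any (fun c => l.contains c) := by
  apply Bool.eq_iff_iff.mpr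
  simp only [List.any_eq_true, List.contains_iff_mem]
  exact ⟨fun ⟨i, hi, hv⟩ => ⟨i, hv, hi⟩, fun ⟨c, hc, hl⟩ => ⟨c, hl, hc⟩⟩

-- ===== VERDICT (by name: the statement is the Claim_ definition above) =====
theorem ValidateSSID_spec : Claim_equal_ValidateSSID := by
  intro value _ hpre
  unfold Spec_ValidateSSID ValidateSSID ValidateSSID_alt
  simp only [pvLoopA_eq, pvAny_swap]
  by_cases h : (List.any (PySem.Set.ofList ['?', '"', '$', '\\', '[', ']', '+'])
      fun i => value.toList.contains i) = true
  · simp only [if_pos h]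
  · simp only [if_neg h]
    have hne : value.toList ≠ [] := fun hnil =>
      hpre (String.toList_inj.mp (by rw [hnil]; rfl))
    cases hv : value.toList with
    | nil => exact absurd hv hne
    | cons c rest =>
        have hg : PySem.List.pyGet? (c :: rest) 0 = some c := by
          simp [PySem.List.pyGet?, PySem.List.pyIdx?]
        simp only [hg]
        by_cases h1 : c = '!' <;> by_cases h2 : c = '#' <;> by_cases h3 : c = ';' <;>
          simp [h1, h2, h3]
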